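-- pv_equiv track=rewrite | github.com/Psikyy/KATARENGA-Co | Katarenga.py | checkRed
-- ===== SOURCE A (Python) =====
-- def checkRed(pawn : tuple, case : tuple, tab_R : list) -> bool:
--     """
--         Renvoie un booléen qui indique si un déplacement horizontal ou vertical est possible pour un pion partant d'une case rouge,
--         en s'assurant qu'il ne traverse pas d'autres cases rouges.
--     """
--     temp_red = [elt for elt in tab_R if elt != pawn]
--     x, y = pawn
--     i, j = case
--     if x != i and y != j:
--         return False
--     dx = 1 if i > x else -1 if i < x else 0
--     dy = 1 if j > y else -1 if j < y else 0
--     current_x, current_y = x, y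
--     while (current_x, current_y) != (i, j):
--         current_x += dx
--         current_y += dy
--         if (current_x, current_y) in temp_red:
--             return False
--     return True
-- ===== SOURCE B (Python) =====
-- def checkRed(pawn: tuple, case: tuple, tab_R: list) -> bool:
--     x, y = pawn
--     i, j = case
--     if x != i and y != j:
--         return False
--     if x == i:
--         return not any(rx == x and min(y, j) <= ry <= max(y, j) and ry != y
--                        for rx, ry in tab_R)
--     return not any(ry == y and min(x, i) <= rx <= max(x, i) and rx != x
--                    for rx, ry in tab_R)
-- ===== Notes on version B (the rewrite author's own statement) =====
-- stated objective: faster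
-- what changed: Instead of stepping square by square from the pawn toward the target and scanning the red list at each step, B makes a single pass over tab_R and tests whether any red cell lies on the move's segment (start excluded, destination included) via min/max interval arithmetic.
import Mathlib
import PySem

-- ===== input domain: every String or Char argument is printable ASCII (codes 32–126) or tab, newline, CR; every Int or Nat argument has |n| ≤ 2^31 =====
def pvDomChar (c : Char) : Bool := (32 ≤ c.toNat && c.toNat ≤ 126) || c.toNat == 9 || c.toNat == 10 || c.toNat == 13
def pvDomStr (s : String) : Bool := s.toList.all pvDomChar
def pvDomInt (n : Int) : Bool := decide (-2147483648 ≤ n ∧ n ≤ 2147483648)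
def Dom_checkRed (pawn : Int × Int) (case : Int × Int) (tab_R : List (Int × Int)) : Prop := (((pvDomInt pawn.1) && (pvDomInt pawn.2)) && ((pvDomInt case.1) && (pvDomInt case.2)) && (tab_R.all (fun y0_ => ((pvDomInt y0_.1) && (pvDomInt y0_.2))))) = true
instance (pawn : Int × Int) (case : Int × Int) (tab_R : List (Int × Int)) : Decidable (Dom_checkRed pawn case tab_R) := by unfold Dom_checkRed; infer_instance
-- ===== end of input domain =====

-- B replaces A's square-by-square walk (re-scanning the red list at every step) by a
-- single pass over tab_R testing segment membership; objective: faster on long moves.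

-- ===== PORT A =====
-- A's while loop; the fuel is |i-x|+|j-y|, the exact number of iterations the Python
-- loop performs (a totality guard only; the 'fuel = 0' branch is never reached on the
-- inputs the guard allows, since the walk reaches (i,j) after exactly that many steps).
def checkRedLoop (i j dx dy : Int) (temp_red : List (Int × Int)) :
    Int → Int → Nat → Bool
  | cx, cy, fuel =>
    if (cx, cy) = (i, j) then true
    else
      match fuel with
      | 0 => true
      | Nat.succ n =>
        if (cx + dx, cy + dy) ∈ temp_red then false
        else checkRedLoop i j dx dy temp_red (cx + dx) (cy + dy) n

def checkRed (pawn : Int × Int) (case : Int × Int) (tab_R : List (Int × Int)) : Bool :=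
  let temp_red := tab_R.filter (fun elt => elt != pawn)
  let x := pawn.1; let y := pawn.2
  let i := case.1; let j := case.2
  if x ≠ i ∧ y ≠ j then false
  else
    let dx : Int := if i > x then 1 else if i < x then -1 else 0
    let dy : Int := if j > y then 1 else if j < y then -1 else 0
    checkRedLoop i j dx dy temp_red x y ((i - x).natAbs + (j - y).natAbs)

-- ===== PORT B =====
def checkRed_alt (pawn : Int × Int) (case : Int × Int) (tab_R : List (Int × Int)) : Bool :=
  let x := pawn.1; let y := pawn.2
  let i := case.1; let j := case.2
  if x ≠ i ∧ y ≠ j then false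
  else if x = i then
    !(tab_R.any (fun r =>
        decide (r.1 = x) && decide (min y j ≤ r.2) && decide (r.2 ≤ max y j) && decide (r.2 ≠ y)))
  else
    !(tab_R.any (fun r =>
        decide (r.2 = y) && decide (min x i ≤ r.1) && decide (r.1 ≤ max x i) && decide (r.1 ≠ x)))

-- ===== PRECONDITION & SPEC =====
def Spec_checkRed (pawn : Int × Int) (case : Int × Int) (tab_R : List (Int × Int)) (out : Bool) : Prop := out = checkRed_alt pawn case tab_R
instance (pawn : Int × Int) (case : Int × Int) (tab_R : List (Int × Int)) (out : Bool) : Decidable (Spec_checkRed pawn case tab_R out) := by unfold Spec_checkRed; infer_instance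

-- ===== CLAIM (what is proved, stated in full; the proofs are below) =====
def Claim_equal_checkRed : Prop := ∀ (pawn : Int × Int) (case : Int × Int) (tab_R : List (Int × Int)), Dom_checkRed pawn case tab_R → Spec_checkRed pawn case tab_R (checkRed pawn case tab_R)

-- ===== LEMMAS AND PROOFS =====

-- any over the pawn-filtered list equals any over the full list when the predicate rules out the pawn
theorem pv_any_filter_ne (tab : List (Int × Int)) (pawn : Int × Int) (p : Int × Int → Bool)
    (h : ∀ r, p r = true → r ≠ pawn) :
    (tab.filter (fun e => e != pawn)).any p = tab.any p := by
  induction tab with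
  | nil => rfl
  | cons a t ih =>
    by_cases ha : a = pawn
    · subst ha
      have hpa : p a = false := by
        cases hp : p a with
        | false => rfl
        | true => exact absurd rfl (h a hp)
      simp [List.filter_cons, hpa, ih]
    · simp [List.filter_cons, ha, ih]

-- vertical walk upward: j = y + n
theorem pv_loop_up (temp : List (Int × Int)) (x j : Int) :
    ∀ (n : Nat) (y : Int), j = y + (n : Int) →
      checkRedLoop x j 0 1 temp x y n =
        !(temp.any (fun r => decide (r.1 = x) && decide (y < r.2) && decide (r.2 ≤ j))) := by
  intro n
  induction n with
  | zero =>
    intro y hy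
    have : y = j := by omega
    subst this
    rw [checkRedLoop]
    simp only [if_pos rfl]
    have : temp.any (fun r => decide (r.1 = x) && decide (y < r.2) && decide (r.2 ≤ y)) = false := by
      rw [List.any_eq_false]
      intro r _
      intro hp
      simp only [Bool.and_eq_true, decide_eq_true_eq] at hp
      omega
    simp [this]
  | succ n ih =>
    intro y hy
    have hne : y ≠ j := by omega
    rw [checkRedLoop]
    simp only [Prod.mk.injEq, add_zero]
    rw [if_neg (by simp [hne])]
    by_cases hm : (x, y + 1) ∈ temp
    · rw [if_pos hm]
      have : temp.any (fun r => decide (r.1 = x) && decide (y < r.2) && decide (r.2 ≤ j)) = true := by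
        rw [List.any_eq_true]
        exact ⟨(x, y + 1), hm, by simp only [Bool.and_eq_true, decide_eq_true_eq]; refine ⟨⟨?_, ?_⟩, ?_⟩ <;> first | trivial | omega⟩
      rw [this]; try rfl
    · rw [if_neg hm, ih (y + 1) (by omega)]
      congr 1
      rw [Bool.eq_iff_iff]
      simp only [List.any_eq_true, Bool.and_eq_true, decide_eq_true_eq]
      constructor
      · rintro ⟨r, hr, ⟨h1, h2⟩, h3⟩
        exact ⟨r, hr, ⟨h1, by omega⟩, h3⟩
      · rintro ⟨r, hr, ⟨h1, h2⟩, h3⟩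
        refine ⟨r, hr, ⟨h1, ?_⟩, h3⟩
        rcases lt_or_eq_of_le (by omega : y + 1 ≤ r.2) with h | h
        · omega
        · exfalso; apply hm
          have : r = (x, y + 1) := by
            rcases r with ⟨rx, ry⟩
            simp_all <;> omega
          rwa [this] at hr
  
-- vertical walk downward: j = y - n
theorem pv_loop_down (temp : List (Int × Int)) (x j : Int) :
    ∀ (n : Nat) (y : Int), j = y - (n : Int) →
      checkRedLoop x j 0 (-1) temp x y n =
        !(temp.any (fun r => decide (r.1 = x) && decide (j ≤ r.2) && decide (r.2 < y))) := by
  intro n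
  induction n with
  | zero =>
    intro y hy
    have : y = j := by omega
    subst this
    rw [checkRedLoop]
    simp only [if_pos rfl]
    have : temp.any (fun r => decide (r.1 = x) && decide (y ≤ r.2) && decide (r.2 < y)) = false := by
      rw [List.any_eq_false]
      intro r _
      intro hp
      simp only [Bool.and_eq_true, decide_eq_true_eq] at hp
      omega
    simp [this]
  | succ n ih =>
    intro y hy
    have hne : y ≠ j := by omega
    rw [checkRedLoop]
    simp only [Prod.mk.injEq, add_zero]
    rw [if_neg (by simp [hne])]
    by_cases hm : (x, y + (-1)) ∈ temp
    · rw [if_pos hm]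
      have : temp.any (fun r => decide (r.1 = x) && decide (j ≤ r.2) && decide (r.2 < y)) = true := by
        rw [List.any_eq_true]
        exact ⟨(x, y + (-1)), hm, by simp only [Bool.and_eq_true, decide_eq_true_eq]; refine ⟨⟨?_, ?_⟩, ?_⟩ <;> first | trivial | omega⟩
      rw [this]; try rfl
    · rw [if_neg hm, ih (y + (-1)) (by omega)]
      congr 1
      rw [Bool.eq_iff_iff]
      simp only [List.any_eq_true, Bool.and_eq_true, decide_eq_true_eq]
      constructor
      · rintro ⟨r, hr, ⟨h1, h2⟩, h3⟩
        exact ⟨r, hr, ⟨h1, h2⟩, by omega⟩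
      · rintro ⟨r, hr, ⟨h1, h2⟩, h3⟩
        refine ⟨r, hr, ⟨h1, h2⟩, ?_⟩
        rcases lt_or_eq_of_le (by omega : r.2 ≤ y - 1) with h | h
        · omega
        · exfalso; apply hm
          have : r = (x, y + (-1)) := by
            rcases r with ⟨rx, ry⟩
            simp_all <;> omega
          rwa [this] at hr

-- horizontal walk rightward: i = x + n
theorem pv_loop_right (temp : List (Int × Int)) (y i : Int) :
    ∀ (n : Nat) (x : Int), i = x + (n : Int) →
      checkRedLoop i y 1 0 temp x y n =
        !(temp.any (fun r => decide (r.2 = y) && decide (x < r.1) && decide (r.1 ≤ i))) := by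
  intro n
  induction n with
  | zero =>
    intro x hx
    have : x = i := by omega
    subst this
    rw [checkRedLoop]
    simp only [if_pos rfl]
    have : temp.any (fun r => decide (r.2 = y) && decide (x < r.1) && decide (r.1 ≤ x)) = false := by
      rw [List.any_eq_false]
      intro r _
      intro hp
      simp only [Bool.and_eq_true, decide_eq_true_eq] at hp
      omega
    simp [this]
  | succ n ih =>
    intro x hx
    have hne : x ≠ i := by omega
    rw [checkRedLoop]
    simp only [Prod.mk.injEq, add_zero]
    rw [if_neg (by simp [hne])]
    by_cases hm : (x + 1, y) ∈ temp
    · rw [if_pos hm]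
      have : temp.any (fun r => decide (r.2 = y) && decide (x < r.1) && decide (r.1 ≤ i)) = true := by
        rw [List.any_eq_true]
        exact ⟨(x + 1, y), hm, by simp only [Bool.and_eq_true, decide_eq_true_eq]; refine ⟨⟨?_, ?_⟩, ?_⟩ <;> first | trivial | omega⟩
      rw [this]; try rfl
    · rw [if_neg hm, ih (x + 1) (by omega)]
      congr 1
      rw [Bool.eq_iff_iff]
      simp only [List.any_eq_true, Bool.and_eq_true, decide_eq_true_eq]
      constructor
      · rintro ⟨r, hr, ⟨h1, h2⟩, h3⟩
        exact ⟨r, hr, ⟨h1, by omega⟩, h3⟩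
      · rintro ⟨r, hr, ⟨h1, h2⟩, h3⟩
        refine ⟨r, hr, ⟨h1, ?_⟩, h3⟩
        rcases lt_or_eq_of_le (by omega : x + 1 ≤ r.1) with h | h
        · omega
        · exfalso; apply hm
          have : r = (x + 1, y) := by
            rcases r with ⟨rx, ry⟩
            simp_all <;> omega
          rwa [this] at hr

-- horizontal walk leftward: i = x - n
theorem pv_loop_left (temp : List (Int × Int)) (y i : Int) :
    ∀ (n : Nat) (x : Int), i = x - (n : Int) →
      checkRedLoop i y (-1) 0 temp x y n =
        !(temp.any (fun r => decide (r.2 = y) && decide (i ≤ r.1) && decide (r.1 < x))) := by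
  intro n
  induction n with
  | zero =>
    intro x hx
    have : x = i := by omega
    subst this
    rw [checkRedLoop]
    simp only [if_pos rfl]
    have : temp.any (fun r => decide (r.2 = y) && decide (x ≤ r.1) && decide (r.1 < x)) = false := by
      rw [List.any_eq_false]
      intro r _
      intro hp
      simp only [Bool.and_eq_true, decide_eq_true_eq] at hp
      omega
    simp [this]
  | succ n ih =>
    intro x hx
    have hne : x ≠ i := by omega
    rw [checkRedLoop]
    simp only [Prod.mk.injEq, add_zero]
    rw [if_neg (by simp [hne])]
    by_cases hm : (x + (-1), y) ∈ temp
    · rw [if_pos hm]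
      have : temp.any (fun r => decide (r.2 = y) && decide (i ≤ r.1) && decide (r.1 < x)) = true := by
        rw [List.any_eq_true]
        exact ⟨(x + (-1), y), hm, by simp only [Bool.and_eq_true, decide_eq_true_eq]; refine ⟨⟨?_, ?_⟩, ?_⟩ <;> first | trivial | omega⟩
      rw [this]; try rfl
    · rw [if_neg hm, ih (x + (-1)) (by omega)]
      congr 1
      rw [Bool.eq_iff_iff]
      simp only [List.any_eq_true, Bool.and_eq_true, decide_eq_true_eq]
      constructor
      · rintro ⟨r, hr, ⟨h1, h2⟩, h3⟩
        exact ⟨r, hr, ⟨h1, h2⟩, by omega⟩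
      · rintro ⟨r, hr, ⟨h1, h2⟩, h3⟩
        refine ⟨r, hr, ⟨h1, h2⟩, ?_⟩
        rcases lt_or_eq_of_le (by omega : r.1 ≤ x - 1) with h | h
        · omega
        · exfalso; apply hm
          have : r = (x + (-1), y) := by
            rcases r with ⟨rx, ry⟩
            simp_all <;> omega
          rwa [this] at hr

-- two bool predicates agreeing pointwise on members give equal any
theorem pv_any_iff (tab : List (Int × Int)) (p q : Int × Int → Bool)
    (h : ∀ r, p r = true ↔ q r = true) : tab.any p = tab.any q := by
  rw [Bool.eq_iff_iff]
  simp only [List.any_eq_true]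
  exact ⟨fun ⟨r, hr, hp⟩ => ⟨r, hr, (h r).1 hp⟩, fun ⟨r, hr, hq⟩ => ⟨r, hr, (h r).2 hq⟩⟩

-- ===== VERDICT (by name: the statement is the Claim_ definition above) =====
theorem checkRed_spec : Claim_equal_checkRed := by
  intro pawn case tab_R _
  unfold Spec_checkRed checkRed checkRed_alt
  rcases pawn with ⟨x, y⟩
  rcases case with ⟨i, j⟩
  simp only []
  by_cases hguard : x ≠ i ∧ y ≠ j
  · rw [if_pos hguard, if_pos hguard]
  · rw [if_neg hguard, if_neg hguard]
    by_cases hx : x = i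
    · subst hx
      rw [if_pos rfl]
      have hdx : (if x > x then (1:Int) else if x < x then -1 else 0) = 0 := by simp
      rw [hdx]
      rcases lt_trichotomy y j with hlt | heq | hgt
      · -- upward
        have hdy : (if j > y then (1:Int) else if j < y then -1 else 0) = 1 := by
          rw [if_pos hlt]
        rw [hdy]
        have hn : j = y + (((x - x).natAbs + (j - y).natAbs : Nat) : Int) := by
          simp only [sub_self, Int.natAbs_zero]
          omega
        rw [pv_loop_up _ x j _ y hn]
        congr 1
        rw [pv_any_filter_ne tab_R (x, y)
          (fun r => decide (r.1 = x) && decide (y < r.2) && decide (r.2 ≤ j))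
          (by intro r hp h; subst h; simp at hp <;> omega)]
        apply pv_any_iff
        intro r
        simp only [Bool.and_eq_true, decide_eq_true_eq]
        omega
      · -- same square
        subst heq
        have hdy : (if y > y then (1:Int) else if y < y then -1 else 0) = 0 := by simp
        rw [hdy]
        simp only [sub_self, Int.natAbs_zero, Nat.add_zero]
        rw [checkRedLoop]
        rw [if_pos rfl]
        have : tab_R.any (fun r =>
            decide (r.1 = x) && decide (min y y ≤ r.2) && decide (r.2 ≤ max y y) && decide (r.2 ≠ y)) = false := by
          rw [List.any_eq_false]
          intro r _
          intro hp
          simp only [Bool.and_eq_true, decide_eq_true_eq, min_self, max_self] at hp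
          omega
        rw [this]; try rfl
      · -- downward
        have hdy : (if j > y then (1:Int) else if j < y then -1 else 0) = -1 := by
          rw [if_neg (by omega), if_pos hgt]
        rw [hdy]
        have hn : j = y - (((x - x).natAbs + (j - y).natAbs : Nat) : Int) := by
          simp only [sub_self, Int.natAbs_zero]
          omega
        rw [pv_loop_down _ x j _ y hn]
        congr 1
        rw [pv_any_filter_ne tab_R (x, y)
          (fun r => decide (r.1 = x) && decide (j ≤ r.2) && decide (r.2 < y))
          (by intro r hp h; subst h; simp at hp <;> omega)]
        apply pv_any_iff
        intro r
        simp only [Bool.and_eq_true, decide_eq_true_eq]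
        omega
    · -- y = j, x ≠ i
      have hy : y = j := by tauto
      subst hy
      rw [if_neg hx]
      have hdy : (if y > y then (1:Int) else if y < y then -1 else 0) = 0 := by simp
      rw [hdy]
      rcases lt_trichotomy x i with hlt | heq | hgt
      · -- rightward
        have hdx : (if i > x then (1:Int) else if i < x then -1 else 0) = 1 := by
          rw [if_pos hlt]
        rw [hdx]
        have hn : i = x + (((i - x).natAbs + (y - y).natAbs : Nat) : Int) := by
          simp only [sub_self, Int.natAbs_zero]
          omega
        rw [pv_loop_right _ y i _ x hn]
        congr 1
        rw [pv_any_filter_ne tab_R (x, y)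
          (fun r => decide (r.2 = y) && decide (x < r.1) && decide (r.1 ≤ i))
          (by intro r hp h; subst h; simp at hp <;> omega)]
        apply pv_any_iff
        intro r
        simp only [Bool.and_eq_true, decide_eq_true_eq]
        omega
      · exact absurd heq hx
      · -- leftward
        have hdx : (if i > x then (1:Int) else if i < x then -1 else 0) = -1 := by
          rw [if_neg (by omega), if_pos hgt]
        rw [hdx]
        have hn : i = x - (((i - x).natAbs + (y - y).natAbs : Nat) : Int) := by
          simp only [sub_self, Int.natAbs_zero]
          omega
        rw [pv_loop_left _ y i _ x hn]
        congr 1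
        rw [pv_any_filter_ne tab_R (x, y)
          (fun r => decide (r.2 = y) && decide (i ≤ r.1) && decide (r.1 < x))
          (by intro r hp h; subst h; simp at hp <;> omega)]
        apply pv_any_iff
        intro r
        simp only [Bool.and_eq_true, decide_eq_true_eq]
        omega
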